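-- pv_equiv track=rewrite | github.com/chentianran/knotted | homcoef.py | reduce_sum
-- ===== SOURCE A (Python) =====
-- class Sum (list):
--     pass
--
-- def reduce_sum (s):
--     d = {}
--     for x in s:
--         if x in d:
--             d[x] += 1
--         else:
--             d[x] = 1
--     r = []
--     for x in d.keys():
--         if d[x] % 2 != 0:
--             r.append(x)
--     return Sum(sorted(r))
-- ===== SOURCE B (Python) =====
-- class Sum (list):
--     pass
--
-- def reduce_sum (s):
--     t = sorted(s)
--     r = []
--     i = 0
--     n = len(t)
--     while i < n:
--         j = i + 1
--         while j < n and t[j] == t[i]: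
--             j += 1
--         if (j - i) % 2 == 1:
--             r.append(t[i])
--         i = j
--     return Sum(r)
-- ===== Notes on version B (the rewrite author's own statement) =====
-- stated objective: alternative
-- what changed: Replaces A's hash-map counting pass followed by a final sort of the odd-count keys with a single sort of the input followed by one run-length sweep over consecutive equal elements, appending a run's value when its length is odd; no dict and no second sort.
import Mathlib
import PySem

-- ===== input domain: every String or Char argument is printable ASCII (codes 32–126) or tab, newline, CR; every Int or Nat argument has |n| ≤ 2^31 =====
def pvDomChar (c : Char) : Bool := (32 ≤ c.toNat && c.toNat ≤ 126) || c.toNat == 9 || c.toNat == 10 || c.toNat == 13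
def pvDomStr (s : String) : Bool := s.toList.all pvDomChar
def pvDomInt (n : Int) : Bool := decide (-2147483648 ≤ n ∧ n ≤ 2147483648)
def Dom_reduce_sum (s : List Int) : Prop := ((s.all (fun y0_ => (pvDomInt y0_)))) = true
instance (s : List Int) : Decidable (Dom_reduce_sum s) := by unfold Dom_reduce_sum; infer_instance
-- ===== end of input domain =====

-- B replaces A's hash-count-then-sort decomposition by a sort-then-run-length-sweep (alternative algorithm of the same O(n log n) cost).

-- ===== PORT A =====
def reduce_sum (s : List Int) : List Int :=
  let d := s.foldl (fun d x =>
      if d.contains x then d.insert x (d.getD x 0 + 1)   -- if x in d: d[x] += 1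
      else d.insert x (1 : Int)) PySem.Dict.empty        -- else: d[x] = 1
  let r := d.keys.foldl (fun r x =>
      if PySem.Int.mod (d.getD x 0) 2 ≠ 0 then r ++ [x] else r) ([] : List Int)
  PySem.List.sorted r (fun x => x) false

-- ===== PORT B =====
-- outer while loop of Source B: consume one run of equal elements per step, append the
-- run's value to the accumulator r when the run length (j - i) is odd
def pvSweepLoop (t : List Int) (r : List Int) : List Int :=
  match t with
  | [] => r
  | x :: xs =>
    let run := 1 + (xs.takeWhile (· == x)).length        -- inner while loop: j - i
    let r' := if run % 2 = 1 then r ++ [x] else r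
    pvSweepLoop (xs.dropWhile (· == x)) r'
termination_by t.length
decreasing_by
  have := List.length_dropWhile_le (· == x) xs
  simp; omega

def reduce_sum_alt (s : List Int) : List Int :=
  pvSweepLoop (PySem.List.sorted s (fun x => x) false) []

-- ===== PRECONDITION & SPEC =====
def Spec_reduce_sum (s : List Int) (out : List Int) : Prop := out = reduce_sum_alt s
instance (s : List Int) (out : List Int) : Decidable (Spec_reduce_sum s out) := by unfold Spec_reduce_sum; infer_instance

-- ===== CLAIM (what is proved, stated in full; the proofs are below) =====
def Claim_equal_reduce_sum : Prop := ∀ (s : List Int), Dom_reduce_sum s → Spec_reduce_sum s (reduce_sum s)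

-- ===== LEMMAS AND PROOFS =====

-- cons-building form of the sweep, used only by the proofs below
def pvSweep (t : List Int) : List Int :=
  match t with
  | [] => []
  | x :: xs =>
    let rest := pvSweep (xs.dropWhile (· == x))
    if (1 + (xs.takeWhile (· == x)).length) % 2 = 1 then x :: rest else rest
termination_by t.length
decreasing_by
  have := List.length_dropWhile_le (· == x) xs
  simp; omega

theorem pvSweepLoop_eq (t r : List Int) : pvSweepLoop t r = r ++ pvSweep t := by
  fun_induction pvSweepLoop t r with
  | case1 r => simp [pvSweep]
  | case2 r x xs run r' ih =>
    rw [ih]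
    simp only [pvSweep, run, r']
    split <;> simp

-- every element of the dropWhile part of a sorted run is strictly above the head
theorem pvDrop_gt (x : Int) (xs : List Int) (hle : ∀ y ∈ xs, x ≤ y)
    (hp : xs.Pairwise (· ≤ ·)) : ∀ z ∈ xs.dropWhile (· == x), x < z := by
  induction xs with
  | nil => simp
  | cons y ys ih =>
    rw [List.dropWhile_cons]
    rcases List.pairwise_cons.1 hp with ⟨hy, hys⟩
    by_cases h : y = x
    · subst h
      simp only [BEq.rfl, if_true]
      exact ih (fun z hz => hle z (List.mem_cons_of_mem _ hz)) hys
    · simp only [beq_iff_eq, h, if_false]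
      intro z hz
      rcases List.mem_cons.1 hz with rfl | hz
      · exact lt_of_le_of_ne (hle z (List.mem_cons_self)) (Ne.symm h)
      · exact lt_of_lt_of_le (lt_of_le_of_ne (hle y List.mem_cons_self) (Ne.symm h)) (hy z hz)

theorem pvSweep_subset (t : List Int) : ∀ y ∈ pvSweep t, y ∈ t := by
  fun_induction pvSweep t with
  | case1 => simp
  | case2 x xs rest _ ih =>
    intro y hy
    have sub : ∀ z ∈ xs.dropWhile (· == x), z ∈ xs := fun z hz =>
      (List.dropWhile_sublist _).subset hz
    rcases List.mem_cons.1 hy with rfl | hy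
    · exact List.mem_cons_self
    · exact List.mem_cons_of_mem _ (sub _ (ih _ hy))
  | case3 x xs rest _ ih =>
    intro y hy
    have sub : ∀ z ∈ xs.dropWhile (· == x), z ∈ xs := fun z hz =>
      (List.dropWhile_sublist _).subset hz
    exact List.mem_cons_of_mem _ (sub _ (ih _ hy))

theorem pvRun_count (x : Int) (xs : List Int) (hle : ∀ y ∈ xs, x ≤ y)
    (hp : xs.Pairwise (· ≤ ·)) :
    (x :: xs).count x = 1 + (xs.takeWhile (· == x)).length := by
  have hsplit : xs = xs.takeWhile (· == x) ++ xs.dropWhile (· == x) :=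
    (List.takeWhile_append_dropWhile).symm
  have h1 : (xs.takeWhile (· == x)).count x = (xs.takeWhile (· == x)).length := by
    rw [List.count_eq_length]
    intro b hb
    have hpb : (b == x) = true := List.mem_takeWhile_imp (p := (· == x)) hb
    exact (beq_iff_eq.1 hpb).symm
  have h2 : (xs.dropWhile (· == x)).count x = 0 := by
    rw [List.count_eq_zero]
    intro hx
    exact absurd (pvDrop_gt x xs hle hp x hx) (lt_irrefl x)
  rw [List.count_cons_self]
  conv_lhs => rw [hsplit]
  rw [List.count_append, h1, h2]
  omega

theorem pvCount_ne (x y : Int) (xs : List Int) (hne : y ≠ x) :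
    (x :: xs).count y = (xs.dropWhile (· == x)).count y := by
  have hsplit : xs = xs.takeWhile (· == x) ++ xs.dropWhile (· == x) :=
    (List.takeWhile_append_dropWhile).symm
  have h1 : (xs.takeWhile (· == x)).count y = 0 := by
    rw [List.count_eq_zero]
    intro hy
    have hpb : (y == x) = true := List.mem_takeWhile_imp (p := (· == x)) hy
    exact hne (beq_iff_eq.1 hpb)
  rw [List.count_cons, if_neg (by simpa using Ne.symm hne)]
  conv_lhs => rw [hsplit]
  rw [List.count_append, h1]
  omega

theorem pvMem_drop_iff (x y : Int) (xs : List Int) (hne : y ≠ x) :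
    y ∈ x :: xs ↔ y ∈ xs.dropWhile (· == x) := by
  constructor
  · intro h
    rcases List.mem_cons.1 h with rfl | h
    · exact absurd rfl hne
    · conv at h => rw [← List.takeWhile_append_dropWhile (p := (· == x)) (l := xs)]
      rcases List.mem_append.1 h with h | h
      · have hpb : (y == x) = true := List.mem_takeWhile_imp (p := (· == x)) h
        exact absurd (beq_iff_eq.1 hpb) hne
      · exact h
  · intro h
    exact List.mem_cons_of_mem _ ((List.dropWhile_sublist _).subset h)

theorem pvSweep_mem (t : List Int) (hp : t.Pairwise (· ≤ ·)) :
    ∀ y, y ∈ pvSweep t ↔ y ∈ t ∧ t.count y % 2 = 1 := by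
  induction t using pvSweep.induct with
  | case1 => simp [pvSweep]
  | case2 x xs hif ih =>
    rcases List.pairwise_cons.1 hp with ⟨hle, hpxs⟩
    have hpd : (xs.dropWhile (· == x)).Pairwise (· ≤ ·) :=
      hpxs.sublist (List.dropWhile_sublist _)
    have hgt := pvDrop_gt x xs hle hpxs
    intro y
    rw [pvSweep]
    simp only [hif, if_true]
    by_cases hy : y = x
    · subst hy
      have hnot : y ∉ pvSweep (xs.dropWhile (· == y)) := by
        intro h
        exact absurd (hgt y (pvSweep_subset _ y h)) (lt_irrefl y)
      constructor
      · intro _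
        refine ⟨List.mem_cons_self, ?_⟩
        rw [pvRun_count y xs hle hpxs]
        omega
      · intro _
        exact List.mem_cons_self
    · constructor
      · intro h
        rcases List.mem_cons.1 h with rfl | h
        · exact absurd rfl hy
        · obtain ⟨h1, h2⟩ := (ih hpd y).1 h
          refine ⟨(pvMem_drop_iff x y xs hy).2 h1, ?_⟩
          rw [pvCount_ne x y xs hy]
          exact h2
      · intro ⟨h1, h2⟩
        refine List.mem_cons_of_mem _ ((ih hpd y).2 ⟨(pvMem_drop_iff x y xs hy).1 h1, ?_⟩)
        rw [← pvCount_ne x y xs hy]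
        exact h2
  | case3 x xs hif ih =>
    rcases List.pairwise_cons.1 hp with ⟨hle, hpxs⟩
    have hpd : (xs.dropWhile (· == x)).Pairwise (· ≤ ·) :=
      hpxs.sublist (List.dropWhile_sublist _)
    have hgt := pvDrop_gt x xs hle hpxs
    intro y
    rw [pvSweep]
    simp only [hif, if_false]
    by_cases hy : y = x
    · subst hy
      have hnot : y ∉ pvSweep (xs.dropWhile (· == y)) := by
        intro h
        exact absurd (hgt y (pvSweep_subset _ y h)) (lt_irrefl y)
      simp only [hnot, false_iff]
      intro ⟨_, hc⟩
      rw [pvRun_count y xs hle hpxs] at hc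
      omega
    · rw [ih hpd y, pvCount_ne x y xs hy, pvMem_drop_iff x y xs hy]

theorem pvSweep_pairwise (t : List Int) (hp : t.Pairwise (· ≤ ·)) :
    (pvSweep t).Pairwise (· < ·) := by
  induction t using pvSweep.induct with
  | case1 => simp [pvSweep]
  | case2 x xs hif ih =>
    rcases List.pairwise_cons.1 hp with ⟨hle, hpxs⟩
    have hpd : (xs.dropWhile (· == x)).Pairwise (· ≤ ·) :=
      hpxs.sublist (List.dropWhile_sublist _)
    have hgt := pvDrop_gt x xs hle hpxs
    rw [pvSweep]
    simp only [hif, if_true]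
    exact List.pairwise_cons.2 ⟨fun z hz => hgt z (pvSweep_subset _ z hz), ih hpd⟩
  | case3 x xs hif ih =>
    rcases List.pairwise_cons.1 hp with ⟨hle, hpxs⟩
    have hpd : (xs.dropWhile (· == x)).Pairwise (· ≤ ·) :=
      hpxs.sublist (List.dropWhile_sublist _)
    rw [pvSweep]
    simp only [hif, if_false]
    exact ih hpd

theorem pvReduce_eq (s : List Int) : reduce_sum s = reduce_sum_alt s := by
  simp only [reduce_sum, reduce_sum_alt]
  have hd : (s.foldl (fun d x =>
      if d.contains x then d.insert x (d.getD x 0 + 1)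
      else d.insert x (1 : Int)) PySem.Dict.empty) = PySem.Dict.counter s := by
    have hstep : (fun (d : PySem.Dict Int Int) (x : Int) =>
        if d.contains x then d.insert x (d.getD x 0 + 1) else d.insert x 1)
        = fun d x => d.insert x (d.getD x 0 + 1) := by
      funext d x
      cases hc : d.contains x with
      | true => simp
      | false =>
        rw [if_neg (by simp)]
        have h0 : d.getD x 0 = 0 := PySem.Dict.getD_of_not_contains d 0 hc
        rw [h0]
        norm_num
    rw [hstep, PySem.Dict.foldl_insert_getD_add_one_eq_counter]
  rw [hd, PySem.Dict.keys_counter]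
  simp only [PySem.Dict.getD_counter]
  have hcond : (fun (r : List Int) (x : Int) =>
      if PySem.Int.mod ((s.count x : Int)) 2 ≠ 0 then r ++ [x] else r)
      = (fun r x => if decide (PySem.Int.mod ((s.count x : Int)) 2 ≠ 0) = true
          then r ++ [x] else r) := by
    funext r x
    by_cases h : PySem.Int.mod ((s.count x : Int)) 2 ≠ 0
    · rw [if_pos h, if_pos (decide_eq_true h)]
    · rw [if_neg h, if_neg (by simp only [decide_eq_true_eq]; exact h)]
  rw [hcond, PySem.List.foldl_append_if, List.map_id']
  rw [pvSweepLoop_eq, List.nil_append]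
  set B := pvSweep (PySem.List.sorted s (fun x => x) false) with hB
  have hps : (PySem.List.sorted s (fun x => x) false).Pairwise (· ≤ ·) :=
    PySem.List.sorted_pairwise s (fun x => x)
  have hBpw : B.Pairwise (· < ·) := pvSweep_pairwise _ hps
  have hBnd : B.Nodup := hBpw.imp ne_of_lt
  have hperm : ((PySem.Set.ofList s).filter
      (fun x => decide (PySem.Int.mod ((s.count x : Int)) 2 ≠ 0))).Perm B := by
    have hnd : ((PySem.Set.ofList s).filter
        (fun x => decide (PySem.Int.mod ((s.count x : Int)) 2 ≠ 0))).Nodup :=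
      (PySem.Set.nodup_ofList s).filter _
    rw [List.perm_ext_iff_of_nodup hnd hBnd]
    intro y
    rw [List.mem_filter, PySem.Set.mem_ofList, hB, pvSweep_mem _ hps y,
      PySem.List.mem_sorted, (PySem.List.sorted_perm s (fun x => x) false).count_eq y]
    have hm : PySem.Int.mod ((s.count y : Int)) 2 = (s.count y : Int) % 2 :=
      PySem.Int.mod_eq_emod_of_pos (by norm_num)
    constructor
    · intro ⟨h1, h2⟩
      rw [decide_eq_true_eq, hm] at h2
      exact ⟨h1, by omega⟩
    · intro ⟨h1, h2⟩
      refine ⟨h1, ?_⟩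
      rw [decide_eq_true_eq, hm]
      omega
  rw [List.nil_append]
  exact PySem.List.sorted_eq_of_perm_of_pairwise_lt _ _ _ hperm.symm hBpw

-- ===== VERDICT (by name: the statement is the Claim_ definition above) =====
theorem reduce_sum_spec : Claim_equal_reduce_sum := by
  intro s _
  unfold Spec_reduce_sum
  exact pvReduce_eq s
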